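-- pv_equiv track=rewrite | github.com/hanenza/db-selection-project | python/algorithm.py | calculateMaxDist
-- ===== SOURCE A (Python) =====
-- def calculateMaxDist(profiles, nfrs):
--     res = {}
--     for i in nfrs:
--         res[i] = 0
--     for profile in profiles:
--         for nfr in nfrs:
--             if (profile[nfr] > res[nfr]):
--                 res[nfr] = profile[nfr]
--     return res
-- ===== SOURCE B (Python) =====
-- def calculateMaxDist(profiles, nfrs):
--     # Divide and conquer: split the profile list in half, solve each half
--     # recursively, and merge the two partial results key-wise.
--     if not profiles:
--         return {nfr: 0 for nfr in nfrs}
--     if len(profiles) == 1: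
--         p = profiles[0]
--         return {nfr: max(0, p[nfr]) for nfr in nfrs}
--     mid = len(profiles) // 2
--     left = calculateMaxDist(profiles[:mid], nfrs)
--     right = calculateMaxDist(profiles[mid:], nfrs)
--     return {nfr: max(left[nfr], right[nfr]) for nfr in nfrs}
-- ===== Notes on version B (the rewrite author's own statement) =====
-- stated objective: alternative
-- what changed: Replaced A's zero-init pass plus profile-outer/nfr-inner compare-and-update sweep with a divide-and-conquer recursion: the profile list is split in half, each half is solved recursively, and the two partial dicts are merged key-wise with max (the one-profile base case floors at 0).
import Mathlib
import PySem

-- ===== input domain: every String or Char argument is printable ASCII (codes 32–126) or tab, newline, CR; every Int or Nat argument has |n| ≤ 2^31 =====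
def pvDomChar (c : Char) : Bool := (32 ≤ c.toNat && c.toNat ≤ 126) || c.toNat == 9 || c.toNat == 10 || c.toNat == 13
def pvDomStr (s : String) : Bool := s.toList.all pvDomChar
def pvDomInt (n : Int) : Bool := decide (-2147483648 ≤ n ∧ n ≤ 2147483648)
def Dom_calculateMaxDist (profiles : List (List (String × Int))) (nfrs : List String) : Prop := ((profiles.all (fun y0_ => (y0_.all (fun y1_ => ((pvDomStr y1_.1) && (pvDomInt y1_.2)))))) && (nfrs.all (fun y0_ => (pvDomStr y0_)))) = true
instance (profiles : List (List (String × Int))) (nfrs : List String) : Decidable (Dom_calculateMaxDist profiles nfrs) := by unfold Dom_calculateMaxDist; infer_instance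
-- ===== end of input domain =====

-- B replaces A's zero-init pass plus profile-outer/nfr-inner compare-and-update sweep with a
-- divide-and-conquer recursion that splits the profile list in half and merges the two partial
-- dicts key-wise with max (objective: alternative; same asymptotic cost).

-- profile[nfr] in both Pythons; exact whenever the key is present (guaranteed by Pre_)
def pvLookup (profile : List (String × Int)) (k : String) : Int :=
  ((PySem.Dict.mk profile).get? k).getD 0

-- ===== PORT A =====
def calculateMaxDist (profiles : List (List (String × Int))) (nfrs : List String) : List (String × Int) :=
  (profiles.foldl (fun r profile =>
      nfrs.foldl (fun r nfr =>
        if pvLookup profile nfr > r.getD nfr 0 then r.insert nfr (pvLookup profile nfr) else r) r)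
    (nfrs.foldl (fun (r : PySem.Dict String Int) i => r.insert i 0) PySem.Dict.empty)).items

-- ===== PORT B =====
-- {nfr: max(left[nfr], right[nfr]) for nfr in nfrs} of Source B
def pvMergeMax (nfrs : List String) (l r : PySem.Dict String Int) : PySem.Dict String Int :=
  nfrs.foldl (fun d nfr => d.insert nfr (max (l.getD nfr 0) (r.getD nfr 0))) PySem.Dict.empty

-- Source B's recursion; profiles[:mid] / profiles[mid:] are List.take / List.drop (exact: 0 ≤ mid ≤ len),
-- len(profiles) // 2 on the nonnegative length is Nat division.
def pvSolve (profiles : List (List (String × Int))) (nfrs : List String) : PySem.Dict String Int :=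
  match profiles with
  | [] => nfrs.foldl (fun (d : PySem.Dict String Int) nfr => d.insert nfr 0) PySem.Dict.empty
  | [p] => nfrs.foldl (fun (d : PySem.Dict String Int) nfr => d.insert nfr (max 0 (pvLookup p nfr))) PySem.Dict.empty
  | a :: b :: rest =>
    let ps := a :: b :: rest
    let mid := ps.length / 2
    pvMergeMax nfrs (pvSolve (ps.take mid) nfrs) (pvSolve (ps.drop mid) nfrs)
termination_by profiles.length
decreasing_by
  · simp [List.length_take]; omega
  · simp [List.length_drop]; omega

def calculateMaxDist_alt (profiles : List (List (String × Int))) (nfrs : List String) : List (String × Int) :=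
  (pvSolve profiles nfrs).items

-- ===== PRECONDITION & SPEC =====
-- Pre_ excludes exactly the inputs where Python A raises KeyError: some nfr missing from some profile.
def Pre_calculateMaxDist (profiles : List (List (String × Int))) (nfrs : List String) : Prop :=
  (profiles.all (fun p => nfrs.all (fun k => p.any (fun q => q.1 == k)))) = true
instance (profiles : List (List (String × Int))) (nfrs : List String) : Decidable (Pre_calculateMaxDist profiles nfrs) := by unfold Pre_calculateMaxDist; infer_instance
def pvWitness_calculateMaxDist : (List (List (String × Int))) × List String :=
  ([[("a", 3), ("b", -1)], [("a", 1), ("b", 5)]], ["a", "b"])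

def Spec_calculateMaxDist (profiles : List (List (String × Int))) (nfrs : List String) (out : List (String × Int)) : Prop := out = calculateMaxDist_alt profiles nfrs
instance (profiles : List (List (String × Int))) (nfrs : List String) (out : List (String × Int)) : Decidable (Spec_calculateMaxDist profiles nfrs out) := by unfold Spec_calculateMaxDist; infer_instance

-- ===== CLAIM (what is proved, stated in full; the proofs are below) =====
def Claim_equal_calculateMaxDist : Prop := ∀ (profiles : List (List (String × Int))) (nfrs : List String), Dom_calculateMaxDist profiles nfrs → Pre_calculateMaxDist profiles nfrs → Spec_calculateMaxDist profiles nfrs (calculateMaxDist profiles nfrs)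

-- ===== LEMMAS AND PROOFS =====

-- per-key maximum over a profile list, floored at 0 (the value both ports compute)
def pvMaxOf (profiles : List (List (String × Int))) (k : String) : Int :=
  (profiles.map (fun p => pvLookup p k)).foldl max 0

-- canonical form of every dict both ports build: first occurrences of nfrs, values a function of the key
def pvCanon (nfrs : List String) (g : String → Int) : PySem.Dict String Int :=
  PySem.Dict.mk ((PySem.Set.ofList nfrs).map (fun k => (k, g k)))

theorem getD_build (g : String → Int) (l : List String) (d : PySem.Dict String Int) (k : String) :
    (l.foldl (fun r x => r.insert x (g x)) d).getD k 0
      = if k ∈ l then g k else d.getD k 0 := by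
  induction l generalizing d with
  | nil => simp
  | cons x xs ih =>
    simp only [List.foldl_cons, ih, PySem.Dict.getD_insert, List.mem_cons]
    by_cases hxs : k ∈ xs <;> by_cases hx : k = x <;> simp [hxs, hx]

theorem build_canon (g : String → Int) (nfrs : List String) :
    nfrs.foldl (fun r x => r.insert x (g x)) PySem.Dict.empty = pvCanon nfrs g := by
  apply PySem.Dict.ext
  have hkeys : (nfrs.foldl (fun r x => r.insert x (g x)) PySem.Dict.empty).keys
      = PySem.Set.ofList nfrs := by
    rw [PySem.Dict.keys_foldl_insert]
    simp [PySem.Dict.keys_empty, PySem.Set.update_nil_left]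
  have hnd : (nfrs.foldl (fun r x => r.insert x (g x)) PySem.Dict.empty).keys.Nodup := by
    rw [hkeys]; exact PySem.Set.nodup_ofList nfrs
  rw [PySem.Dict.items_eq_map_keys _ hnd 0, hkeys, pvCanon]
  apply List.map_congr_left
  intro k hk
  rw [getD_build]
  simp [(PySem.Set.mem_ofList nfrs k).mp hk]

theorem canon_congr (nfrs : List String) (g g' : String → Int)
    (h : ∀ k ∈ nfrs, g k = g' k) : pvCanon nfrs g = pvCanon nfrs g' := by
  unfold pvCanon
  congr 1
  apply List.map_congr_left
  intro k hk
  rw [h k ((PySem.Set.mem_ofList nfrs k).mp hk)]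

theorem getD_canon (nfrs : List String) (g : String → Int) (k : String) :
    (pvCanon nfrs g).getD k 0 = if k ∈ nfrs then g k else 0 := by
  rw [← build_canon, getD_build]
  simp [PySem.Dict.getD, PySem.Dict.empty, PySem.Dict.get?]

theorem merge_canon (nfrs : List String) (g1 g2 : String → Int) :
    pvMergeMax nfrs (pvCanon nfrs g1) (pvCanon nfrs g2)
      = pvCanon nfrs (fun k => max (g1 k) (g2 k)) := by
  unfold pvMergeMax
  rw [build_canon (fun k => max ((pvCanon nfrs g1).getD k 0) ((pvCanon nfrs g2).getD k 0)) nfrs]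
  apply canon_congr
  intro k hk
  rw [getD_canon, getD_canon]
  simp [hk]

theorem foldl_max_shift (l : List Int) : ∀ (a b : Int),
    l.foldl max (max a b) = max a (l.foldl max b) := by
  induction l with
  | nil => intro a b; simp
  | cons x xs ih =>
    intro a b
    simp only [List.foldl_cons, max_assoc, ih]

theorem foldl_max_nonneg (l : List Int) : 0 ≤ l.foldl max 0 := by
  have h := foldl_max_shift l 0 0
  simp only [max_self] at h
  omega

theorem maxOf_append (l1 l2 : List (List (String × Int))) (k : String) :
    pvMaxOf (l1 ++ l2) k = max (pvMaxOf l1 k) (pvMaxOf l2 k) := by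
  unfold pvMaxOf
  rw [List.map_append, List.foldl_append]
  calc (l2.map (fun p => pvLookup p k)).foldl max ((l1.map (fun p => pvLookup p k)).foldl max 0)
      = (l2.map (fun p => pvLookup p k)).foldl max
          (max ((l1.map (fun p => pvLookup p k)).foldl max 0) 0) := by
        rw [max_eq_left (foldl_max_nonneg _)]
    _ = max ((l1.map (fun p => pvLookup p k)).foldl max 0)
          ((l2.map (fun p => pvLookup p k)).foldl max 0) := foldl_max_shift _ _ _

theorem solve_canon (nfrs : List String) :
    ∀ (n : ℕ) (profiles : List (List (String × Int))), profiles.length = n →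
      pvSolve profiles nfrs = pvCanon nfrs (fun k => pvMaxOf profiles k) := by
  intro n
  induction n using Nat.strong_induction_on with
  | _ n ih =>
    intro profiles hlen
    match profiles with
    | [] =>
      rw [pvSolve, build_canon]
      exact canon_congr _ _ _ (fun k _ => by simp [pvMaxOf])
    | [p] =>
      rw [pvSolve, build_canon]
      exact canon_congr _ _ _ (fun k _ => by simp [pvMaxOf])
    | a :: b :: rest =>
      rw [pvSolve]
      have hmid : (a :: b :: rest).length / 2 < n := by
        simp at hlen ⊢; omega
      have hmid1 : 1 ≤ (a :: b :: rest).length / 2 := by simp; omega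
      set ps := a :: b :: rest with hps
      set mid := ps.length / 2 with hm
      have htake : (ps.take mid).length < n := by
        rw [List.length_take]; omega
      have hdrop : (ps.drop mid).length < n := by
        rw [List.length_drop]; simp [hps] at hlen ⊢; omega
      rw [ih _ htake _ rfl, ih _ hdrop _ rfl, merge_canon]
      apply canon_congr
      intro k _
      rw [← maxOf_append, List.take_append_drop]

theorem inner_gen (p : List (String × Int)) (l : List String) (d : PySem.Dict String Int)
    (hnd : d.keys.Nodup) (hsub : ∀ k ∈ l, k ∈ d.keys) :
    l.foldl (fun r nfr => if pvLookup p nfr > r.getD nfr 0 then r.insert nfr (pvLookup p nfr) else r) d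
      = PySem.Dict.mk (d.items.map (fun q => if q.1 ∈ l then (q.1, max q.2 (pvLookup p q.1)) else q)) := by
  induction l generalizing d with
  | nil =>
    apply PySem.Dict.ext; simp
  | cons k rest ih =>
    have hkd : k ∈ d.keys := hsub k (List.mem_cons_self ..)
    have hcont : d.contains k = true := (PySem.Dict.contains_iff_mem_keys d k).mpr hkd
    set d1 := if pvLookup p k > d.getD k 0 then d.insert k (pvLookup p k) else d with hd1
    have hitems1 : d1.items
        = d.items.map (fun q => if q.1 = k then (k, max q.2 (pvLookup p q.1)) else q) := by
      rw [hd1]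
      split_ifs with hgt
      · rw [PySem.Dict.items_insert_of_contains d (pvLookup p k) hcont]
        apply List.map_congr_left
        rintro ⟨k', v'⟩ hq
        by_cases hqk : k' = k
        · subst hqk
          have hv : d.getD k' 0 = v' := PySem.Dict.getD_of_mem_items d hq hnd 0
          have hmax : max v' (pvLookup p k') = pvLookup p k' := by omega
          simp [hmax]
        · simp [hqk]
      · conv_lhs => rw [← List.map_id' d.items]
        apply List.map_congr_left
        rintro ⟨k', v'⟩ hq
        by_cases hqk : k' = k
        · subst hqk
          have hv : d.getD k' 0 = v' := PySem.Dict.getD_of_mem_items d hq hnd 0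
          have hmax : max v' (pvLookup p k') = v' := by omega
          simp [hmax]
        · simp [hqk]
    have hkeys1 : d1.keys = d.keys := by
      simp only [PySem.Dict.keys, hitems1, List.map_map]
      apply List.map_congr_left
      intro q hq
      by_cases hqk : q.1 = k <;> simp [hqk]
    rw [List.foldl_cons, ← hd1, ih d1 (hkeys1 ▸ hnd) (fun x hx => hkeys1 ▸ hsub x (List.mem_cons_of_mem _ hx))]
    apply PySem.Dict.ext
    simp only [hitems1, List.map_map]
    apply List.map_congr_left
    intro q hq
    by_cases hqk : q.1 = k
    · simp [Function.comp, hqk, List.mem_cons]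
    · by_cases hqr : q.1 ∈ rest <;>
        simp [Function.comp, hqk, hqr, List.mem_cons]

theorem inner_canon (p : List (String × Int)) (nfrs : List String) (g : String → Int) :
    nfrs.foldl (fun r nfr => if pvLookup p nfr > r.getD nfr 0 then r.insert nfr (pvLookup p nfr) else r) (pvCanon nfrs g)
      = pvCanon nfrs (fun k => max (g k) (pvLookup p k)) := by
  have hkeys : (pvCanon nfrs g).keys = PySem.Set.ofList nfrs := by
    show ((PySem.Set.ofList nfrs).map (fun k => (k, g k))).map (fun q => q.1) = PySem.Set.ofList nfrs
    rw [List.map_map]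
    exact List.map_id' _
  rw [inner_gen p nfrs _ (by rw [hkeys]; exact PySem.Set.nodup_ofList nfrs)
      (fun k hk => by rw [hkeys]; exact (PySem.Set.mem_ofList nfrs k).mpr hk)]
  unfold pvCanon
  congr 1
  rw [List.map_map]
  apply List.map_congr_left
  intro k hk
  simp [(PySem.Set.mem_ofList nfrs k).mp hk]

theorem outer_canon (profiles : List (List (String × Int))) (nfrs : List String) (g : String → Int) :
    profiles.foldl (fun r profile =>
        nfrs.foldl (fun r nfr => if pvLookup profile nfr > r.getD nfr 0 then r.insert nfr (pvLookup profile nfr) else r) r)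
      (pvCanon nfrs g)
      = pvCanon nfrs (fun k => (profiles.map (fun p => pvLookup p k)).foldl max (g k)) := by
  induction profiles generalizing g with
  | nil => simp
  | cons p ps ih =>
    rw [List.foldl_cons, inner_canon, ih]
    simp [List.foldl_cons]

-- ===== VERDICT (by name: the statement is the Claim_ definition above) =====
theorem calculateMaxDist_spec : Claim_equal_calculateMaxDist := by
  intro profiles nfrs _ _
  unfold Spec_calculateMaxDist calculateMaxDist calculateMaxDist_alt
  rw [build_canon (fun _ => 0) nfrs, outer_canon, solve_canon nfrs profiles.length profiles rfl]
  rfl
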